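-- pv_equiv track=rewrite | github.com/hyunil-cho/algo | 프로그래머스/2/42586. 기능개발/기능개발.py | solution
-- ===== SOURCE A (Python) =====
-- def solution(progresses, speeds):
--     answer = []
--
--     cur_idx = 0
--     size = len(speeds)
--     while cur_idx < size:
--
--         for idx, next in enumerate(speeds):
--             progresses[idx] += next
--
--         cnt = 0
--
--         while True:
--             if len(progresses) > cur_idx and progresses[cur_idx] >= 100:
--                 cnt+=1
--                 cur_idx += 1
--             else:
--                 break;
--
--         if cnt > 0 :
--             answer.append(cnt)
--
--
--     return answer
-- ===== SOURCE B (Python) =====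
-- def solution(progresses, speeds):
--     # Closed-form completion day per task, then one pass grouping by running maximum.
--     # (Unlike A, this does not mutate `progresses`; the equivalence is about the return value.)
--     days = [1 if p + s >= 100 else -((p - 100) // s) for p, s in zip(progresses, speeds)]
--     answer = []
--     group_day = None
--     count = 0
--     for d in days:
--         if group_day is None or d > group_day:
--             if count != 0:
--                 answer.append(count)
--             group_day = d
--             count = 1
--         else:
--             count += 1
--     if count != 0:
--         answer.append(count)
--     return answer
-- ===== Notes on version B (the rewrite author's own statement) =====
-- stated objective: alternative
-- what changed: Replaces A's day-by-day simulation (repeatedly adding every speed to every progress until tasks pass 100) with a closed-form completion day per task via ceiling division and a single left-to-right pass grouping by running maximum.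
-- outside the precondition, e.g. on solution([50, 100], [50]): A returns [2], B returns [1]; on solution([102], [-1]): A returns [1], B returns [1]
import Mathlib
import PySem

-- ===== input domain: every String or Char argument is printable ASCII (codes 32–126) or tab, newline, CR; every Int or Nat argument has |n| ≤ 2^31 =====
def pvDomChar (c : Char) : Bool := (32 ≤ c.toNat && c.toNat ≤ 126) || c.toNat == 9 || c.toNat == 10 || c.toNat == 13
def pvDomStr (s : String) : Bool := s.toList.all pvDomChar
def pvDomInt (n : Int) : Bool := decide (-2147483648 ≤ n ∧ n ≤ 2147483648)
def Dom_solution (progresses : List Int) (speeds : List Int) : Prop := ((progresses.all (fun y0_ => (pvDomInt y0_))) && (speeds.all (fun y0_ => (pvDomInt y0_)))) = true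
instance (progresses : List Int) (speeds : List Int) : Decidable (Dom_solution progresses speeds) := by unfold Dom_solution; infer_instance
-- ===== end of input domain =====

-- B replaces A's day-by-day simulation with a closed-form completion day per task and one
-- grouping pass (A also mutates `progresses` in place; the equivalence is about the return value).

-- ===== PORT A =====
-- for idx, next in enumerate(speeds): progresses[idx] += next
def pvAddSpeeds (ps : List Int) (ss : List Int) : List Int :=
  (PySem.List.enumerate ss 0).foldl
    (fun acc x => PySem.List.pySetD acc x.1 (PySem.List.pyGetD acc x.1 0 + x.2)) ps

-- while True: if len(progresses) > cur_idx and progresses[cur_idx] >= 100: cnt += 1; cur_idx += 1 else break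
-- (fuel only makes the loop total; it is never exhausted on admitted inputs)
def pvInner (ps : List Int) (cur : Nat) (cnt : Int) (fuel : Nat) : Int × Nat :=
  match fuel with
  | 0 => (cnt, cur)
  | f + 1 =>
    if cur < ps.length ∧ 100 ≤ ps.getD cur 0 then pvInner ps (cur + 1) (cnt + 1) f
    else (cnt, cur)

-- while cur_idx < size: …  (fuel only makes the loop total; under Pre_ it is never exhausted)
def pvOuter (ps : List Int) (ss : List Int) (cur : Nat) (answer : List Int) (fuel : Nat) : List Int :=
  match fuel with
  | 0 => answer
  | f + 1 =>
    if cur < ss.length then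
      let ps' := pvAddSpeeds ps ss
      let r := pvInner ps' cur 0 (ps'.length + 1)
      pvOuter ps' ss r.2 (if 0 < r.1 then answer ++ [r.1] else answer) f
    else answer

def pvFuelA (ps : List Int) : Nat := ps.foldl (fun a p => a + p.natAbs + 101) 1

def solution (progresses : List Int) (speeds : List Int) : List Int :=
  pvOuter progresses speeds 0 [] (pvFuelA progresses)

-- ===== PORT B =====
-- 1 if p + s >= 100 else -((p - 100) // s)
def pvDays (p : Int) (s : Int) : Int :=
  if 100 ≤ p + s then 1 else -(PySem.Int.floordiv (p - 100) s)

-- one step of B's grouping loop; state = (answer, group_day, count)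
def pvGroupStep (acc : List Int × Option Int × Int) (d : Int) : List Int × Option Int × Int :=
  match acc with
  | (ans, none, c) => ((if c ≠ 0 then ans ++ [c] else ans), some d, 1)
  | (ans, some g, c) =>
    if g < d then ((if c ≠ 0 then ans ++ [c] else ans), some d, 1)
    else (ans, some g, c + 1)

def solution_alt (progresses : List Int) (speeds : List Int) : List Int :=
  let days := List.zipWith pvDays progresses speeds
  let r := days.foldl pvGroupStep ([], none, 0)
  if r.2.2 ≠ 0 then r.1 ++ [r.2.2] else r.1

-- ===== PRECONDITION & SPEC =====
-- Pre_ excludes (a) progress lists shorter than speeds, where A raises IndexError, (b) trailing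
-- extra progresses ≥ 100, which A accidentally counts although they never receive a speed, and
-- (c) negative speeds and zero-speed unfinished tasks, on which A loops forever on all but a few
-- schedules.
def Pre_solution (progresses : List Int) (speeds : List Int) : Prop :=
  speeds.length ≤ progresses.length ∧
    (∀ x ∈ progresses.zip speeds, 0 < x.2 ∨ (x.2 = 0 ∧ 100 ≤ x.1)) ∧
    ∀ p ∈ progresses.drop speeds.length, p < 100
instance (progresses : List Int) (speeds : List Int) : Decidable (Pre_solution progresses speeds) := by
  unfold Pre_solution; infer_instance

def pvWitness_solution : List Int × List Int := ([93, 30, 55], [1, 30, 5])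

def Spec_solution (progresses : List Int) (speeds : List Int) (out : List Int) : Prop := out = solution_alt progresses speeds
instance (progresses : List Int) (speeds : List Int) (out : List Int) : Decidable (Spec_solution progresses speeds out) := by unfold Spec_solution; infer_instance

-- ===== CLAIM (what is proved, stated in full; the proofs are below) =====
def Claim_equal_solution : Prop := ∀ (progresses : List Int) (speeds : List Int), Dom_solution progresses speeds → Pre_solution progresses speeds → Spec_solution progresses speeds (solution progresses speeds)

-- ===== LEMMAS AND PROOFS =====

-- reference: group lengths, each group headed by a new running maximum
def pvGroups : List Int → List Int
  | [] => []
  | d :: rest =>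
    (1 + ((rest.takeWhile (fun x => x ≤ d)).length : Int)) ::
      pvGroups (rest.dropWhile (fun x => x ≤ d))
termination_by l => l.length
decreasing_by
  have := List.length_dropWhile_le (p := fun x => decide (x ≤ d)) (l := rest)
  simp; omega

theorem pvGroups_nil : pvGroups [] = [] := by simp [pvGroups]

theorem pvGroups_cons (d : Int) (rest : List Int) :
    pvGroups (d :: rest) =
      (1 + ((rest.takeWhile (fun x => x ≤ d)).length : Int)) ::
        pvGroups (rest.dropWhile (fun x => x ≤ d)) := by
  conv_lhs => unfold pvGroups

-- B's fold from a live group state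
theorem fold_group_some (days : List Int) (ans : List Int) (g : Int) (c : Int) (hc : 0 < c) :
    (let r := days.foldl pvGroupStep (ans, some g, c)
     if r.2.2 ≠ 0 then r.1 ++ [r.2.2] else r.1) =
      ans ++ (c + ((days.takeWhile (fun x => x ≤ g)).length : Int)) ::
        pvGroups (days.dropWhile (fun x => x ≤ g)) := by
  induction days generalizing ans g c with
  | nil => simp [pvGroups_nil, show c ≠ 0 by omega]
  | cons d rest ih =>
    by_cases h : d ≤ g
    · have hstep : pvGroupStep (ans, some g, c) d = (ans, some g, c + 1) := by
        simp [pvGroupStep, show ¬ g < d by omega]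
      rw [List.foldl_cons, hstep, ih ans g (c + 1) (by omega)]
      simp [h]; ring_nf
    · have hstep : pvGroupStep (ans, some g, c) d = (ans ++ [c], some d, 1) := by
        simp [pvGroupStep, show g < d by omega, show c ≠ 0 by omega]
      rw [List.foldl_cons, hstep, ih (ans ++ [c]) d 1 (by omega)]
      simp [h, pvGroups_cons]

theorem alt_eq_groups (progresses speeds : List Int) :
    solution_alt progresses speeds = pvGroups (List.zipWith pvDays progresses speeds) := by
  unfold solution_alt
  cases hd : List.zipWith pvDays progresses speeds with
  | nil => simpa using pvGroups_nil.symm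
  | cons d rest =>
    have hstep : pvGroupStep ([], none, 0) d = ([], some d, 1) := by simp [pvGroupStep]
    simp only [List.foldl_cons, hstep]
    have := fold_group_some rest [] d 1 (by omega)
    simp only at this
    rw [this]
    simp [pvGroups_cons]

-- per-task facts
theorem pvDays_pos (p s : Int) (h : 0 < s ∨ (s = 0 ∧ 100 ≤ p)) : 1 ≤ pvDays p s := by
  unfold pvDays
  split_ifs with h1
  · omega
  · have hs : 0 < s := by omega
    have h2 : ((0 : Int) ≤ PySem.Int.floordiv (p - 100) s ↔ 0 * s ≤ p - 100) :=
      PySem.Int.le_floordiv_iff_mul_le hs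
    omega

theorem pvDays_iff (p s : Int) (h : 0 < s ∨ (s = 0 ∧ 100 ≤ p)) (t : Int) (ht : 1 ≤ t) :
    (100 ≤ p + t * s ↔ pvDays p s ≤ t) := by
  unfold pvDays
  split_ifs with h1
  · constructor
    · intro _; omega
    · intro _
      rcases h with hs | ⟨hs0, hp⟩
      · nlinarith
      · rw [hs0]; omega
  · have hs : 0 < s := by omega
    have h2 : ((-t : Int) ≤ PySem.Int.floordiv (p - 100) s ↔ -t * s ≤ p - 100) :=
      PySem.Int.le_floordiv_iff_mul_le hs
    have h3 : (-t) * s = -(t * s) := by ring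
    rw [h3] at h2
    omega

-- bound used to justify the fuel
theorem pvDays_le (p s : Int) (h : 0 < s ∨ (s = 0 ∧ 100 ≤ p)) :
    pvDays p s ≤ (p.natAbs : Int) + 101 := by
  unfold pvDays
  split_ifs with h1
  · have : (0 : Int) ≤ (p.natAbs : Int) := by positivity
    omega
  · have hs : 0 < s := by omega
    have h2 : ((-((p.natAbs : Int) + 101)) ≤ PySem.Int.floordiv (p - 100) s ↔
        (-((p.natAbs : Int) + 101)) * s ≤ p - 100) :=
      PySem.Int.le_floordiv_iff_mul_le hs
    have hA : (0 : Int) ≤ (p.natAbs : Int) + 101 := by positivity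
    have hmul : ((p.natAbs : Int) + 101) ≤ ((p.natAbs : Int) + 101) * s :=
      le_mul_of_one_le_right hA hs
    have hp : -((p.natAbs : Int)) ≤ p := by
      rcases Int.natAbs_eq p with he | he <;> omega
    have h4 : (-((p.natAbs : Int) + 101)) * s = -(((p.natAbs : Int) + 101) * s) := by ring
    rw [h4] at h2
    omega

theorem pvFuel_shift (ps : List Int) (a : Nat) :
    ps.foldl (fun a p => a + p.natAbs + 101) a = a + ps.foldl (fun a p => a + p.natAbs + 101) 0 := by
  induction ps generalizing a with
  | nil => simp
  | cons q qs ih =>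
    simp only [List.foldl_cons]
    rw [ih, ih (0 + q.natAbs + 101)]
    omega

theorem pvFuelA_ge (ps : List Int) (p : Int) (hp : p ∈ ps) :
    (p.natAbs : Int) + 101 ≤ (pvFuelA ps : Int) := by
  have hN : p.natAbs + 101 ≤ pvFuelA ps := by
    unfold pvFuelA
    induction ps with
    | nil => cases hp
    | cons q qs ih =>
      simp only [List.foldl_cons]
      rw [pvFuel_shift]
      rcases List.mem_cons.mp hp with rfl | hmem
      · omega
      · have h2 := ih hmem
        rw [pvFuel_shift] at h2
        omega
  exact_mod_cast hN

-- one update step of A's speed loop, at a successor index, skips the head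
theorem pySetD_natCast (xs : List Int) (n : Nat) (v : Int) :
    PySem.List.pySetD xs (n : Int) v = xs.set n v := by
  simp [PySem.List.pySetD, PySem.List.pySet?, PySem.List.pyIdx?]
  split_ifs with h1
  · simp
  · simp only [Option.getD_none]
    exact (List.set_eq_of_length_le (by omega)).symm

theorem pySetGet_zero (xs : List Int) (p v : Int) :
    PySem.List.pySetD (p :: xs) 0 (PySem.List.pyGetD (p :: xs) 0 0 + v) = (p + v) :: xs := by
  rw [PySem.List.pyGetD_zero_cons]
  have h := pySetD_natCast (p :: xs) 0 (p + v)
  simpa using h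

theorem pySetGet_cons (xs : List Int) (a v : Int) (m : Nat) :
    PySem.List.pySetD (a :: xs) (((m + 1 : Nat)) : Int)
        (PySem.List.pyGetD (a :: xs) (((m + 1 : Nat)) : Int) 0 + v) =
      a :: PySem.List.pySetD xs ((m : Nat) : Int) (PySem.List.pyGetD xs ((m : Nat) : Int) 0 + v) := by
  rw [pySetD_natCast, pySetD_natCast, PySem.List.pyGetD_natCast, PySem.List.pyGetD_natCast]
  simp

theorem addSpeeds_shift (ss : List Int) (m : Nat) (a : Int) (ps : List Int) :
    (PySem.List.enumerate ss ((m : Int) + 1)).foldl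
        (fun acc x => PySem.List.pySetD acc x.1 (PySem.List.pyGetD acc x.1 0 + x.2)) (a :: ps) =
      a :: (PySem.List.enumerate ss (m : Int)).foldl
        (fun acc x => PySem.List.pySetD acc x.1 (PySem.List.pyGetD acc x.1 0 + x.2)) ps := by
  induction ss generalizing m a ps with
  | nil => simp [PySem.List.enumerate_nil]
  | cons v ss ih =>
    rw [PySem.List.enumerate_cons, PySem.List.enumerate_cons]
    simp only [List.foldl_cons]
    have h1 : ((m : Int) + 1) = (((m + 1 : Nat)) : Int) := by push_cast; ring
    rw [h1, pySetGet_cons, ih]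

-- pvAddSpeeds adds speeds pointwise and leaves trailing extra progresses unchanged
theorem addSpeeds_eq (ss ps : List Int) (h : ss.length ≤ ps.length) :
    pvAddSpeeds ps ss = List.zipWith (· + ·) ps ss ++ ps.drop ss.length := by
  induction ss generalizing ps with
  | nil => simp [pvAddSpeeds, PySem.List.enumerate_nil]
  | cons v ss ih =>
    cases ps with
    | nil => simp at h
    | cons p ps =>
      unfold pvAddSpeeds
      rw [PySem.List.enumerate_cons]
      simp only [List.foldl_cons]
      rw [pySetGet_zero]
      rw [show ((0 : Int) + 1) = (((0 : Nat)) : Int) + 1 from by norm_num, addSpeeds_shift]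
      rw [List.zipWith_cons_cons]
      have hih := ih ps (by simpa using h)
      unfold pvAddSpeeds at hih
      rw [show (((0 : Nat)) : Int) = (0 : Int) from by norm_num, hih]
      simp

-- the two speed-update formulations agree day over day (extras beyond speeds are dropped)
theorem zip_add (t : Int) : ∀ (ss ps extras : List Int), ss.length ≤ ps.length →
    List.zipWith (· + ·) (List.zipWith (fun p s => p + t * s) ps ss ++ extras) ss =
      List.zipWith (fun p s => p + (t + 1) * s) ps ss := by
  intro ss
  induction ss with
  | nil => intro ps extras h; simp
  | cons v ss ih =>
    intro ps extras h
    cases ps with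
    | nil => simp at h
    | cons p ps =>
      simp only [List.zipWith_cons_cons, List.cons_append]
      rw [ih ps extras (by simpa using h)]
      ring_nf

theorem zip_zero : ∀ (ss ps : List Int), ss.length ≤ ps.length →
    List.zipWith (fun p s => p + 0 * s) ps ss = ps.take ss.length := by
  intro ss
  induction ss with
  | nil => intro ps h; simp
  | cons v ss ih =>
    intro ps h
    cases ps with
    | nil => simp at h
    | cons p ps =>
      rw [List.zipWith_cons_cons, ih ps (by simpa using h)]
      simp

theorem mem_zipWith {f : Int → Int → Int} : ∀ (ps ss : List Int) (d : Int),
    d ∈ List.zipWith f ps ss → ∃ x ∈ ps.zip ss, d = f x.1 x.2 := by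
  intro ps
  induction ps with
  | nil => intro ss d h; simp at h
  | cons p ps ih =>
    intro ss d h
    cases ss with
    | nil => simp at h
    | cons s ss =>
      rcases List.mem_cons.mp h with rfl | hm
      · exact ⟨(p, s), by simp⟩
      · obtain ⟨x, hx, hd⟩ := ih ss d hm
        exact ⟨x, List.mem_cons_of_mem _ hx, hd⟩

-- the inner loop counts the ready prefix (extras after the tracked tasks are always < 100)
theorem inner_eq (L : List Int) (T : List Int) (hlen : T.length ≤ L.length) (t : Int)
    (hiff : ∀ i (h : i < T.length), (100 ≤ L[i]'(by omega) ↔ T[i] ≤ t))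
    (hextra : ∀ i (h1 : T.length ≤ i) (h2 : i < L.length), L[i] < 100) :
    ∀ (fuel : Nat) (cur : Nat) (cnt : Int), L.length - cur < fuel →
    pvInner L cur cnt fuel =
      (cnt + (((T.drop cur).takeWhile (fun d => d ≤ t)).length : Int),
        cur + ((T.drop cur).takeWhile (fun d => d ≤ t)).length) := by
  intro fuel
  induction fuel with
  | zero => intro cur cnt hfuel; omega
  | succ f ih =>
    intro cur cnt hfuel
    unfold pvInner
    by_cases hcur : cur < L.length
    · have hget : L.getD cur 0 = L[cur] := List.getD_eq_getElem L 0 hcur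
      by_cases hcurT : cur < T.length
      · have hdrop : T.drop cur = T[cur] :: T.drop (cur + 1) := List.drop_eq_getElem_cons hcurT
        by_cases hready : T[cur] ≤ t
        · rw [if_pos ⟨hcur, by rw [hget]; exact (hiff cur hcurT).mpr hready⟩]
          rw [ih (cur + 1) (cnt + 1) (by omega)]
          rw [hdrop]
          simp only [List.takeWhile_cons, decide_eq_true hready, if_true, List.length_cons,
            Prod.mk.injEq]
          constructor
          · push_cast; ring
          · omega
        · rw [if_neg (by rw [hget]; intro hcon; exact hready ((hiff cur hcurT).mp hcon.2))]
          rw [hdrop]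
          simp [hready]
      · rw [if_neg (by rw [hget]; intro hcon; exact absurd hcon.2 (by
          have := hextra cur (by omega) hcur; omega))]
        have : T.drop cur = [] := List.drop_of_length_le (by omega)
        simp [this]
    · rw [if_neg (by intro hcon; exact hcur hcon.1)]
      have : T.drop cur = [] := List.drop_of_length_le (by omega)
      simp [this]

-- after the ready prefix, the next task (if any) is not ready
theorem drop_takeWhile_len (T : List Int) (p : Int → Bool) :
    T.drop (T.takeWhile p).length = T.dropWhile p := by
  induction T with
  | nil => simp
  | cons d rest ih =>
    by_cases h : p d
    · simp [h, ih]
    · simp [h]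

-- the outer loop, from a blocked state, produces exactly the remaining groups
theorem outer_eq (ps ss : List Int) (hlen : ss.length ≤ ps.length)
    (hP : ∀ x ∈ ps.zip ss, 0 < x.2 ∨ (x.2 = 0 ∧ 100 ≤ x.1))
    (hPx : ∀ p ∈ ps.drop ss.length, p < 100) :
    ∀ (fuel : Nat) (t : Nat) (k : Nat) (answer : List Int),
      k ≤ ss.length →
      (∀ h : k < ss.length, (t : Int) < (List.zipWith pvDays ps ss)[k]'(by simp; omega)) →
      (∀ d ∈ (List.zipWith pvDays ps ss).drop k, d ≤ (t : Int) + fuel) →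
      pvOuter (List.zipWith (fun p s => p + (t : Int) * s) ps ss ++ ps.drop ss.length)
          ss k answer fuel =
        answer ++ pvGroups ((List.zipWith pvDays ps ss).drop k) := by
  have hdayslen : (List.zipWith pvDays ps ss).length = ss.length := by simp; omega
  have hPre : ∀ i (h : i < ss.length),
      0 < ss[i] ∨ (ss[i] = 0 ∧ 100 ≤ ps[i]'(by omega)) := by
    intro i hi
    have hz : (ps[i]'(by omega), ss[i]) ∈ ps.zip ss := by
      have : i < (ps.zip ss).length := by simp; omega
      have hzz : (ps.zip ss)[i] = (ps[i]'(by omega), ss[i]) := List.getElem_zip ..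
      rw [← hzz]; exact List.getElem_mem this
    exact hP _ hz
  intro fuel
  induction fuel with
  | zero =>
    intro t k answer hk hblock hC
    by_cases hkn : k < ss.length
    · exfalso
      have h1 := hblock hkn
      have h2 := hC ((List.zipWith pvDays ps ss)[k]'(by omega))
        (by rw [List.drop_eq_getElem_cons (by omega)]; exact List.mem_cons_self ..)
      push_cast at h2
      omega
    · have hkeq : k = ss.length := by omega
      have : (List.zipWith pvDays ps ss).drop k = [] :=
        List.drop_of_length_le (by omega)
      simp [pvOuter, this, pvGroups_nil]
  | succ f ih =>
    intro t k answer hk hblock hC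
    unfold pvOuter
    by_cases hkn : k < ss.length
    · rw [if_pos hkn]
      have hXlen : (List.zipWith (fun p s => p + (t : Int) * s) ps ss).length = ss.length := by
        simp; omega
      have hadd : pvAddSpeeds
            (List.zipWith (fun p s => p + (t : Int) * s) ps ss ++ ps.drop ss.length) ss =
          List.zipWith (fun p s => p + ((t : Int) + 1) * s) ps ss ++ ps.drop ss.length := by
        rw [addSpeeds_eq ss _ (by simp; omega), zip_add t ss ps _ hlen,
          List.drop_left' hXlen]
      simp only [hadd]
      have hL'len : (List.zipWith (fun p s => p + ((t : Int) + 1) * s) ps ss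
          ++ ps.drop ss.length).length = ps.length := by
        simp; omega
      set days := List.zipWith pvDays ps ss with hdays
      have hdklt : k < days.length := by omega
      have hiff : ∀ i (h : i < days.length),
          (100 ≤ (List.zipWith (fun p s => p + ((t : Int) + 1) * s) ps ss
            ++ ps.drop ss.length)[i]'(by simp; omega) ↔
            days[i] ≤ (t : Int) + 1) := by
        intro i hi
        have hi' : i < ss.length := by omega
        have hg : (List.zipWith (fun p s => p + ((t : Int) + 1) * s) ps ss
            ++ ps.drop ss.length)[i]'(by simp; omega) =
            (List.zipWith (fun p s => p + ((t : Int) + 1) * s) ps ss)[i]'(by simp; omega) :=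
          List.getElem_append_left (by simp; omega)
        rw [hg]
        simp only [hdays, List.getElem_zipWith]
        exact pvDays_iff _ _ (hPre i hi') ((t : Int) + 1) (by omega)
      have hextra : ∀ i (h1 : days.length ≤ i)
          (h2 : i < (List.zipWith (fun p s => p + ((t : Int) + 1) * s) ps ss
            ++ ps.drop ss.length).length),
          (List.zipWith (fun p s => p + ((t : Int) + 1) * s) ps ss
            ++ ps.drop ss.length)[i] < 100 := by
        intro i h1 h2
        have hg : (List.zipWith (fun p s => p + ((t : Int) + 1) * s) ps ss
            ++ ps.drop ss.length)[i] =
            (ps.drop ss.length)[i - ss.length]'(by simp at h2 ⊢; omega) := by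
          rw [List.getElem_append_right (by simp; omega)]
          congr 1
          simp
          omega
        rw [hg]
        exact hPx _ (List.getElem_mem _)
      rw [inner_eq _ days (by simp; omega) ((t : Int) + 1) hiff hextra _ k 0 (by omega)]
      set tw := ((days.drop k).takeWhile (fun d => d ≤ (t : Int) + 1)).length with htw
      have htwle : tw ≤ (days.drop k).length := by
        rw [htw]
        exact (List.takeWhile_sublist _).length_le
      have hdk : days.drop k = (days[k]'hdklt) :: days.drop (k + 1) :=
        List.drop_eq_getElem_cons hdklt
      by_cases hready : (days[k]'hdklt) ≤ (t : Int) + 1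
      · -- the head task completes on day t+1; a whole group is emitted
        have htw1 : 1 ≤ tw := by
          rw [htw, hdk]
          simp only [List.takeWhile_cons, decide_eq_true hready, if_true, List.length_cons]
          omega
        have hdkeq : (days[k]'hdklt) = (t : Int) + 1 :=
          le_antisymm hready (Int.add_one_le_of_lt (hblock hkn))
        simp only []
        rw [if_pos (show (0 : Int) < 0 + (tw : Int) by push_cast; omega)]
        have hdrop' : days.drop (k + tw) = (days.drop k).dropWhile (fun d => d ≤ (t : Int) + 1) := by
          rw [← List.drop_drop, htw, drop_takeWhile_len]
        have hktw : k + tw ≤ ss.length := by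
          have : (days.drop k).length = ss.length - k := by rw [List.length_drop]; omega
          omega
        have hblock' : ∀ h : k + tw < ss.length, ((t + 1 : Nat) : Int) < days[k + tw]'(by omega) := by
          intro hlt
          have hhead : ((days.drop k).dropWhile (fun d => decide (d ≤ (t : Int) + 1))).head? =
              some (days[k + tw]'(by omega)) := by
            rw [← hdrop', List.head?_eq_getElem?, List.getElem?_drop]
            simp only [Nat.add_zero]
            exact List.getElem?_eq_getElem (by omega)
          have hfalse := List.head?_dropWhile_not (fun d => decide (d ≤ (t : Int) + 1)) (days.drop k)
          rw [hhead] at hfalse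
          simp only [decide_eq_false_iff_not] at hfalse
          push_cast
          exact not_le.mp hfalse
        have hC' : ∀ d ∈ days.drop (k + tw), d ≤ ((t + 1 : Nat) : Int) + f := by
          intro d hd
          have : d ∈ days.drop k := by
            rw [← List.drop_drop] at hd
            exact List.mem_of_mem_drop hd
          have := hC d this
          push_cast
          push_cast at this
          omega
        have hrec := ih (t + 1) (k + tw) (answer ++ [(0 : Int) + (tw : Int)]) hktw hblock' hC'
        rw [show (((t + 1 : Nat) : Int)) = ((t : Int) + 1) from by push_cast; ring] at hrec
        rw [hrec]
        rw [hdrop']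
        -- regroup: the emitted count heads the group decomposition
        rw [hdk, pvGroups_cons]
        have hgrp : (1 + (((days.drop (k + 1)).takeWhile
            (fun x => x ≤ days[k]'hdklt)).length : Int)) = (0 : Int) + (tw : Int) := by
          rw [htw, hdk]
          simp only [List.takeWhile_cons, decide_eq_true hready, if_true, List.length_cons]
          rw [hdkeq]
          push_cast
          ring
        have hdw : (days.drop k).dropWhile (fun d => d ≤ (t : Int) + 1) =
            (days.drop (k + 1)).dropWhile (fun x => x ≤ days[k]'hdklt) := by
          rw [hdk, List.dropWhile_cons]
          simp only [decide_eq_true hready, if_true]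
          rw [hdkeq]
        rw [← hgrp, ← hdw]
        simp
      · -- nobody completes on day t+1: the day counter just advances
        have htw0 : tw = 0 := by
          rw [htw, hdk]
          simp [hready]
        simp only [htw0]
        rw [if_neg (by simp)]
        have hrec := ih (t + 1) k answer (by omega)
          (by intro h; push_cast; simp only [← hdays]; exact not_le.mp hready)
          (by intro d hd; have := hC d hd; push_cast; push_cast at this; omega)
        rw [show (((t + 1 : Nat) : Int)) = ((t : Int) + 1) from by push_cast; ring] at hrec
        simpa using hrec
    · rw [if_neg hkn]
      have : (List.zipWith pvDays ps ss).drop k = [] := List.drop_of_length_le (by omega)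
      simp [this, pvGroups_nil]

-- ===== VERDICT (by name: the statement is the Claim_ definition above) =====
theorem solution_spec : Claim_equal_solution := by
  unfold Claim_equal_solution
  intro ps ss _ hpre
  obtain ⟨hlen, hP, hPx⟩ := hpre
  unfold Spec_solution solution
  have hstart : ps = List.zipWith (fun p s => p + ((0 : Nat) : Int) * s) ps ss
      ++ ps.drop ss.length := by
    rw [show (((0 : Nat) : Int)) = (0 : Int) from rfl]
    rw [zip_zero ss ps hlen]
    exact (List.take_append_drop _ _).symm
  have hblock : ∀ h : 0 < ss.length,
      (((0 : Nat)) : Int) < (List.zipWith pvDays ps ss)[0]'(by simp; omega) := by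
    intro h
    rw [List.getElem_zipWith]
    have hz : (ps[0]'(by omega), ss[0]) ∈ ps.zip ss := by
      have hlt : 0 < (ps.zip ss).length := by simp; omega
      have hzz : (ps.zip ss)[0] = (ps[0]'(by omega), ss[0]) := List.getElem_zip ..
      rw [← hzz]; exact List.getElem_mem hlt
    have h1 := pvDays_pos ps[0] ss[0] (hP _ hz)
    exact lt_of_lt_of_le (by norm_num) h1
  have hC : ∀ d ∈ (List.zipWith pvDays ps ss).drop 0, d ≤ (((0 : Nat)) : Int) + (pvFuelA ps) := by
    intro d hd
    rw [List.drop_zero] at hd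
    obtain ⟨x, hx, hdx⟩ := mem_zipWith ps ss d hd
    have h1 := pvDays_le x.1 x.2 (hP x hx)
    have h2 := pvFuelA_ge ps x.1 (List.of_mem_zip hx).1
    rw [hdx]
    have h3 := le_trans h1 h2
    simpa using h3
  have := outer_eq ps ss hlen hP hPx (pvFuelA ps) 0 0 [] (by omega) hblock hC
  rw [← hstart] at this
  rw [this, List.drop_zero, List.nil_append, alt_eq_groups]
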